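-- pv_equiv track=rewrite | github.com/wildjames/AdventOfCode | AdventOfCode_2015/day2.py | calc_surface
-- ===== SOURCE A (Python) =====
-- def calc_surface(l, w, h):
--     A = 2*l*w + 2*w*h + 2*h*l
--
--     largest = max([l,w,h])
--
--     small_sides = [i for i in [l,w,h] if i != largest]
--     # Handle the case where two or three sides are the same length, by appending small_sides with the longest value until it's long enough
--     while len(small_sides) < 2:
--         small_sides.append(largest)
--     slack = small_sides[0] * small_sides[1]
--
--     return A + slack
-- ===== SOURCE B (Python) =====
-- def calc_surface(l, w, h):
--     # Algebraic closed form: with m = max, lw+wh+hl = slack + m*(l+w+h-m),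
--     # so A's surface+slack = 2p + (p - m*(s-m)) = 3p - m*(s-m).
--     s = l + w + h
--     p = l*w + w*h + h*l
--     m = max(l, w, h)
--     return 3*p - m*(s - m)
-- ===== Notes on version B (the rewrite author's own statement) =====
-- stated objective: simpler
-- what changed: Replaces A's list-building max/filter/while-pad/index selection of the two smallest sides by a closed-form algebraic identity: slack = (lw+wh+hl) - max*(l+w+h-max), so the result is 3*(lw+wh+hl) - max*(l+w+h-max) with no lists at all.
import Mathlib
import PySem

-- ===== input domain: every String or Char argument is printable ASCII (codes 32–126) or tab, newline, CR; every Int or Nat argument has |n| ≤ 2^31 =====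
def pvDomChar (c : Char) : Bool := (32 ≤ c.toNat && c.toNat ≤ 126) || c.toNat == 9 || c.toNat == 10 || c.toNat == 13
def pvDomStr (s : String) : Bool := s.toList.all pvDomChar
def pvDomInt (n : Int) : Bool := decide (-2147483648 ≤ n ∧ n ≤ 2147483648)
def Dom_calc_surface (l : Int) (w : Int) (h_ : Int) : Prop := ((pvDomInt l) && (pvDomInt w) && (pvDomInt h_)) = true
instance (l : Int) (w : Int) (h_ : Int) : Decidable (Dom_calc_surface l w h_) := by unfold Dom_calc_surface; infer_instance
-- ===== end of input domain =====

-- B replaces A's list-building max/filter/while-pad/index machinery by the closed-form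
-- identity slack = (lw+wh+hl) - max*(l+w+h-max), returning 3p - m*(s-m) (objective: simpler).

-- ===== PORT A =====
-- the 'while len(small_sides) < 2: small_sides.append(largest)' loop, verbatim
def pvPadLoop (ss : List Int) (largest : Int) : List Int :=
  if ss.length < 2 then pvPadLoop (ss ++ [largest]) largest else ss
termination_by 2 - ss.length
decreasing_by simp; omega

def calc_surface (l : Int) (w : Int) (h_ : Int) : Int :=
  let A := 2*l*w + 2*w*h_ + 2*h_*l
  let largest := (PySem.List.max? [l, w, h_] (fun x => x)).getD 0   -- list nonempty: max? is always some
  let small_sides := List.filter (fun i => i != largest) [l, w, h_]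
  let padded := pvPadLoop small_sides largest
  -- indices 0 and 1 are always in range after the pad loop; getD 0 is never taken
  let slack := (PySem.List.pyGet? padded 0).getD 0 * (PySem.List.pyGet? padded 1).getD 0
  A + slack

-- ===== PORT B =====
def calc_surface_alt (l : Int) (w : Int) (h_ : Int) : Int :=
  let s := l + w + h_
  let p := l*w + w*h_ + h_*l
  let m := max (max l w) h_        -- Python max(l, w, h) on ints
  3*p - m*(s - m)

-- ===== PRECONDITION & SPEC =====
def Spec_calc_surface (l : Int) (w : Int) (h_ : Int) (out : Int) : Prop := out = calc_surface_alt l w h_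
instance (l : Int) (w : Int) (h_ : Int) (out : Int) : Decidable (Spec_calc_surface l w h_ out) := by unfold Spec_calc_surface; infer_instance

-- ===== CLAIM (what is proved, stated in full; the proofs are below) =====
def Claim_equal_calc_surface : Prop := ∀ (l : Int) (w : Int) (h_ : Int), Dom_calc_surface l w h_ → Spec_calc_surface l w h_ (calc_surface l w h_)

-- ===== LEMMAS AND PROOFS =====

theorem pvPadLoop_len2 (a b : Int) (t : List Int) (x : Int) :
    pvPadLoop (a :: b :: t) x = a :: b :: t := by
  unfold pvPadLoop; simp

theorem pvPadLoop_one (a x : Int) : pvPadLoop [a] x = [a, x] := by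
  unfold pvPadLoop; simp [pvPadLoop_len2]

theorem pvPadLoop_nil (x : Int) : pvPadLoop [] x = [x, x] := by
  unfold pvPadLoop; simp [pvPadLoop_one]

theorem pyGet0 (a : Int) (t : List Int) : PySem.List.pyGet? (a :: t) 0 = some a := by
  simp [PySem.List.pyGet?, PySem.List.pyIdx?]

theorem pyGet1 (a b : Int) (t : List Int) : PySem.List.pyGet? (a :: b :: t) 1 = some b := by
  simp [PySem.List.pyGet?, PySem.List.pyIdx?]

theorem fil_pos (x m : Int) (t : List Int) (h : x ≠ m) :
    List.filter (fun i => i != m) (x :: t) = x :: List.filter (fun i => i != m) t := by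
  simp [h]

theorem fil_eq (x m : Int) (t : List Int) (h : x = m) :
    List.filter (fun i => i != m) (x :: t) = List.filter (fun i => i != m) t := by
  simp [h]

theorem fil_neg (m : Int) (t : List Int) :
    List.filter (fun i => i != m) (m :: t) = List.filter (fun i => i != m) t := by
  simp

-- ===== VERDICT (by name: the statement is the Claim_ definition above) =====
theorem calc_surface_spec : Claim_equal_calc_surface := by
  intro l w h_ _
  unfold Spec_calc_surface calc_surface calc_surface_alt
  simp only [PySem.List.max?_id_cons, List.foldl, Option.getD_some]
  rcases lt_trichotomy l w with h1 | h1 | h1 <;>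
    rcases lt_trichotomy w h_ with h2 | h2 | h2 <;>
      rcases lt_trichotomy l h_ with h3 | h3 | h3 <;>
        first
        | omega
        | (rw [show max (max l w) h_ = h_ from by omega,
               fil_pos _ _ _ (by omega : l ≠ h_), fil_pos _ _ _ (by omega : w ≠ h_),
               fil_neg, List.filter_nil, pvPadLoop_len2, pyGet0, pyGet1]
           simp only [Option.getD_some]; ring1)
        | (rw [show max (max l w) h_ = w from by omega,
               fil_pos _ _ _ (by omega : l ≠ w), fil_neg,
               fil_eq _ _ _ (by omega : h_ = w), List.filter_nil, pvPadLoop_one,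
               pyGet0, pyGet1]
           simp only [Option.getD_some]; subst_vars; ring1)
        | (rw [show max (max l w) h_ = w from by omega,
               fil_pos _ _ _ (by omega : l ≠ w), fil_neg,
               fil_pos _ _ _ (by omega : h_ ≠ w), List.filter_nil, pvPadLoop_len2,
               pyGet0, pyGet1]
           simp only [Option.getD_some]; ring1)
        | (rw [show max (max l w) h_ = h_ from by omega,
               fil_pos _ _ _ (by omega : l ≠ h_), fil_pos _ _ _ (by omega : w ≠ h_),
               fil_neg, List.filter_nil, pvPadLoop_len2, pyGet0, pyGet1]
           simp only [Option.getD_some]; subst_vars; ring1)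
        | (rw [show max (max l w) h_ = l from by omega,
               fil_neg, fil_eq _ _ _ (by omega : w = l),
               fil_eq _ _ _ (by omega : h_ = l), List.filter_nil, pvPadLoop_nil,
               pyGet0, pyGet1]
           simp only [Option.getD_some]; subst_vars; ring1)
        | (rw [show max (max l w) h_ = l from by omega,
               fil_neg, fil_eq _ _ _ (by omega : w = l),
               fil_pos _ _ _ (by omega : h_ ≠ l), List.filter_nil, pvPadLoop_one,
               pyGet0, pyGet1]
           simp only [Option.getD_some]; subst_vars; ring1)
        | (rw [show max (max l w) h_ = l from by omega,
               fil_neg, fil_pos _ _ _ (by omega : w ≠ l),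
               fil_eq _ _ _ (by omega : h_ = l), List.filter_nil, pvPadLoop_one,
               pyGet0, pyGet1]
           simp only [Option.getD_some]; subst_vars; ring1)
        | (rw [show max (max l w) h_ = l from by omega,
               fil_neg, fil_pos _ _ _ (by omega : w ≠ l),
               fil_pos _ _ _ (by omega : h_ ≠ l), List.filter_nil, pvPadLoop_len2,
               pyGet0, pyGet1]
           simp only [Option.getD_some]; first | ring1 | (subst_vars; ring1))
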